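-- pv_equiv track=rewrite | github.com/RGarciaf/proyecto_fml | Dataset.py | crearCuadraditos
-- ===== SOURCE A (Python) =====
-- def crearCuadraditos(x_ini, x_fin, y_ini, y_fin, n_pixeles_ancho=None, n_pixeles_alto=None):
--     '''
--     Dada una imagen y unas coordenadas de inicio y fin de la imagen se
--     crean divisiones, recortes, en la imagen que definiran las coordenadas
--     de inicio y fin de cada cuadradito
--     '''
--
--     # None significa que se toma como tamanyo
--     # el ancho (para n_pixeles_ancho) o el alto (para n_pixeles_alto)
--     if n_pixeles_ancho is None:
--         n_pixeles_ancho = x_fin - x_ini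
--     if n_pixeles_alto is None:
--         n_pixeles_alto = y_fin - y_ini
--
--     assert n_pixeles_ancho <= x_fin - x_ini and n_pixeles_alto >= 0, "Tamanyo de ancho incorrecto"
--     assert n_pixeles_alto <= y_fin - y_ini and n_pixeles_ancho >= 0, "Tamanyo de alto incorrecto"
--
--     l_cuadraditros = []
--
--     # Se crean los limites de los cuadraditos
--     for coordenada_y in range(y_ini, y_fin, n_pixeles_alto):
--         for coordenada_x in range(x_ini, x_fin, n_pixeles_ancho):
--
--             # Se obtiene las coordenadas x de inicio y fin del recorte del cuadradito
--             if coordenada_x + n_pixeles_ancho > x_fin: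
--                 l_coordenadas = [(coordenada_x, x_fin)]
--             else:
--                 l_coordenadas = [(coordenada_x, coordenada_x + n_pixeles_ancho)]
--
--             # Se obtiene las coordenadas y de inicio y fin del recorte del cuadradito
--             if coordenada_y + n_pixeles_alto > y_fin:
--                 l_coordenadas.append((coordenada_y, y_fin))
--             else:
--                 l_coordenadas.append((coordenada_y, coordenada_y + n_pixeles_alto))
--
--             l_cuadraditros.append(l_coordenadas)
--
--
--     return l_cuadraditros
-- ===== SOURCE B (Python) =====
-- def crearCuadraditos(x_ini, x_fin, y_ini, y_fin, n_pixeles_ancho=None, n_pixeles_alto=None):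
--     if n_pixeles_ancho is None:
--         n_pixeles_ancho = x_fin - x_ini
--     if n_pixeles_alto is None:
--         n_pixeles_alto = y_fin - y_ini
--
--     assert n_pixeles_ancho <= x_fin - x_ini and n_pixeles_alto >= 0, "Tamanyo de ancho incorrecto"
--     assert n_pixeles_alto <= y_fin - y_ini and n_pixeles_ancho >= 0, "Tamanyo de alto incorrecto"
--
--     # Count rows and columns by ceiling division, then build the grid in ONE flat
--     # pass over cell indices, recovering (row, col) of each cell with divmod.
--     n_cols = (x_fin - x_ini + n_pixeles_ancho - 1) // n_pixeles_ancho
--     n_filas = (y_fin - y_ini + n_pixeles_alto - 1) // n_pixeles_alto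
--
--     def celda(k):
--         fila, col = divmod(k, n_cols)
--         x = x_ini + col * n_pixeles_ancho
--         y = y_ini + fila * n_pixeles_alto
--         return [(x, min(x + n_pixeles_ancho, x_fin)),
--                 (y, min(y + n_pixeles_alto, y_fin))]
--
--     return [celda(k) for k in range(n_filas * n_cols)]
-- ===== Notes on version B (the rewrite author's own statement) =====
-- stated objective: alternative
-- what changed: B first computes the row/column counts by ceiling division and then builds the grid in a single flat pass over cell indices 0..filas*cols-1, recovering each cell's (row,col) with divmod and its coordinates by multiplication, instead of A's two nested range loops over the coordinates with clamping if-branches.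
import Mathlib
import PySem

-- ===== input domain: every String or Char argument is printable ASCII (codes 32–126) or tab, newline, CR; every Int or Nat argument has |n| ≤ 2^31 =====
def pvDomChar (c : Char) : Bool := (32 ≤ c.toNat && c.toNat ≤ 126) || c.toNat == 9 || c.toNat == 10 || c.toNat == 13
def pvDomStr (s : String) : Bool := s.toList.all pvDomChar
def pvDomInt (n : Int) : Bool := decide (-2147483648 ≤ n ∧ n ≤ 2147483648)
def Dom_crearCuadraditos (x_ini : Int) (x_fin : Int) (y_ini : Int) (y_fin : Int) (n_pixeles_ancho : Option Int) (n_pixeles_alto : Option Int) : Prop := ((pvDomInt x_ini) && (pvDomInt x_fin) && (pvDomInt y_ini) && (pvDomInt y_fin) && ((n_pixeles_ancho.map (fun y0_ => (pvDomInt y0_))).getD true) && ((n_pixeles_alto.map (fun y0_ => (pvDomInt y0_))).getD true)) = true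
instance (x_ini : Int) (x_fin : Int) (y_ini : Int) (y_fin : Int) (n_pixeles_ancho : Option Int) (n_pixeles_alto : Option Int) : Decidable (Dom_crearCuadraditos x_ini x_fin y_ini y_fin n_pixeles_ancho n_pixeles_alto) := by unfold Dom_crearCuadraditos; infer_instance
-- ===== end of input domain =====

-- B replaces A's nested coordinate loops with clamping branches by counting rows/columns with
-- ceiling division and one flat pass over cell indices decoded by divmod; objective: alternative.

-- ===== PORT A =====
def crearCuadraditos (x_ini : Int) (x_fin : Int) (y_ini : Int) (y_fin : Int) (n_pixeles_ancho : Option Int) (n_pixeles_alto : Option Int) : List (List (Int × Int)) :=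
  let w := n_pixeles_ancho.getD (x_fin - x_ini)
  let h := n_pixeles_alto.getD (y_fin - y_ini)
  (PySem.List.pyRange y_ini y_fin h).foldl (fun acc coordenada_y =>
    (PySem.List.pyRange x_ini x_fin w).foldl (fun acc coordenada_x =>
      let l_coordenadas :=
        if coordenada_x + w > x_fin then [(coordenada_x, x_fin)]
        else [(coordenada_x, coordenada_x + w)]
      let l_coordenadas :=
        if coordenada_y + h > y_fin then l_coordenadas ++ [(coordenada_y, y_fin)]
        else l_coordenadas ++ [(coordenada_y, coordenada_y + h)]
      acc ++ [l_coordenadas]) acc) []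

-- ===== PORT B =====
-- helper 'celda' of Source B (divmod k n_cols = (floordiv, mod))
def pvCelda (x_ini x_fin y_ini y_fin w h nCols : Int) (k : Int) : List (Int × Int) :=
  let fila := PySem.Int.floordiv k nCols
  let col := PySem.Int.mod k nCols
  let x := x_ini + col * w
  let y := y_ini + fila * h
  [(x, min (x + w) x_fin), (y, min (y + h) y_fin)]

def crearCuadraditos_alt (x_ini : Int) (x_fin : Int) (y_ini : Int) (y_fin : Int) (n_pixeles_ancho : Option Int) (n_pixeles_alto : Option Int) : List (List (Int × Int)) :=
  let w := n_pixeles_ancho.getD (x_fin - x_ini)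
  let h := n_pixeles_alto.getD (y_fin - y_ini)
  let nCols := PySem.Int.floordiv (x_fin - x_ini + w - 1) w
  let nFilas := PySem.Int.floordiv (y_fin - y_ini + h - 1) h
  (PySem.List.pyRange 0 (nFilas * nCols) 1).map (pvCelda x_ini x_fin y_ini y_fin w h nCols)

-- ===== PRECONDITION & SPEC =====
-- Pre_ admits exactly the inputs on which Python A returns: the two asserts pass and both
-- effective steps are non-zero (range() raises ValueError on step 0); together this means
-- 0 < w ≤ x_fin - x_ini and 0 < h ≤ y_fin - y_ini for the effective sizes w, h.
def Pre_crearCuadraditos (x_ini : Int) (x_fin : Int) (y_ini : Int) (y_fin : Int) (n_pixeles_ancho : Option Int) (n_pixeles_alto : Option Int) : Prop :=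
  0 < n_pixeles_ancho.getD (x_fin - x_ini) ∧
  n_pixeles_ancho.getD (x_fin - x_ini) ≤ x_fin - x_ini ∧
  0 < n_pixeles_alto.getD (y_fin - y_ini) ∧
  n_pixeles_alto.getD (y_fin - y_ini) ≤ y_fin - y_ini
instance (x_ini : Int) (x_fin : Int) (y_ini : Int) (y_fin : Int) (n_pixeles_ancho : Option Int) (n_pixeles_alto : Option Int) : Decidable (Pre_crearCuadraditos x_ini x_fin y_ini y_fin n_pixeles_ancho n_pixeles_alto) := by unfold Pre_crearCuadraditos; infer_instance

def pvWitness_crearCuadraditos : Int × Int × Int × Int × Option Int × Option Int := (0, 5, 0, 4, some 2, some 3)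

def Spec_crearCuadraditos (x_ini : Int) (x_fin : Int) (y_ini : Int) (y_fin : Int) (n_pixeles_ancho : Option Int) (n_pixeles_alto : Option Int) (out : List (List (Int × Int))) : Prop := out = crearCuadraditos_alt x_ini x_fin y_ini y_fin n_pixeles_ancho n_pixeles_alto
instance (x_ini : Int) (x_fin : Int) (y_ini : Int) (y_fin : Int) (n_pixeles_ancho : Option Int) (n_pixeles_alto : Option Int) (out : List (List (Int × Int))) : Decidable (Spec_crearCuadraditos x_ini x_fin y_ini y_fin n_pixeles_ancho n_pixeles_alto out) := by unfold Spec_crearCuadraditos; infer_instance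

-- ===== CLAIM =====
def Claim_equal_crearCuadraditos : Prop := ∀ (x_ini : Int) (x_fin : Int) (y_ini : Int) (y_fin : Int) (n_pixeles_ancho : Option Int) (n_pixeles_alto : Option Int), Dom_crearCuadraditos x_ini x_fin y_ini y_fin n_pixeles_ancho n_pixeles_alto → Pre_crearCuadraditos x_ini x_fin y_ini y_fin n_pixeles_ancho n_pixeles_alto → Spec_crearCuadraditos x_ini x_fin y_ini y_fin n_pixeles_ancho n_pixeles_alto (crearCuadraditos x_ini x_fin y_ini y_fin n_pixeles_ancho n_pixeles_alto)

-- ===== LEMMAS AND PROOFS =====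

-- a flat pass over m*n indices equals nested passes, decoding j*n+i
lemma range_mul_flat {a : Type} (f : Nat -> a) (m n : Nat) :
    (List.range (m * n)).map f
      = (List.range m).flatMap (fun j => (List.range n).map (fun i => f (j * n + i))) := by
  induction m with
  | zero => simp
  | succ m ih =>
    have h1 : (m + 1) * n = m * n + n := by ring
    rw [h1, List.range_add, List.map_append, ih, List.range_succ, List.flatMap_append]
    simp [List.map_map, Function.comp, Nat.add_comm]

lemma celda_decode (x_ini x_fin y_ini y_fin w h : Int) (n : Nat) (hn : 0 < n)
    (j i : Nat) (hi : i < n) :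
    pvCelda x_ini x_fin y_ini y_fin w h (n : Int) ((j * n + i : Nat) : Int)
      = [(x_ini + (i : Int) * w, min (x_ini + (i : Int) * w + w) x_fin),
         (y_ini + (j : Int) * h, min (y_ini + (j : Int) * h + h) y_fin)] := by
  have hnz : (0:Int) < (n:Int) := by exact_mod_cast hn
  have hcast : ((j * n + i : Nat) : Int) = (j:Int) * (n:Int) + (i:Int) := by push_cast; ring
  have hfd : PySem.Int.floordiv ((j:Int) * (n:Int) + (i:Int)) (n:Int) = (j : Int) := by
    rw [PySem.Int.floordiv_eq_iff_of_pos hnz]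
    constructor <;> nlinarith [Int.natCast_nonneg i, Int.natCast_nonneg j,
      (show (i:Int) < (n:Int) by exact_mod_cast hi)]
  have hmod : PySem.Int.mod ((j:Int) * (n:Int) + (i:Int)) (n:Int) = (i : Int) := by
    have hk := PySem.Int.floordiv_mul_add_mod ((j:Int) * (n:Int) + (i:Int)) (n:Int)
    rw [hfd] at hk
    linarith
  rw [hcast]
  simp [pvCelda, hfd, hmod]

lemma ceil_count_pos {X s : Int} (hs : 0 < s) (hX : 0 < X) : 0 < ((X + s - 1) / s).toNat := by
  have h1 : 1 <= (X + s - 1) / s := by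
    rw [Int.le_ediv_iff_mul_le hs]; omega
  omega

-- ===== VERDICT (by name: the statement is the Claim_ definition above) =====
theorem crearCuadraditos_spec : Claim_equal_crearCuadraditos := by
  intro x_ini x_fin y_ini y_fin na nh _ hpre
  obtain ⟨hw0, hwle, hh0, hhle⟩ := hpre
  unfold Spec_crearCuadraditos crearCuadraditos crearCuadraditos_alt
  set w := na.getD (x_fin - x_ini) with hw
  set h := nh.getD (y_fin - y_ini) with hh
  have hxlt : x_ini < x_fin := by omega
  have hylt : y_ini < y_fin := by omega
  set n : Nat := ((x_fin - x_ini + w - 1) / w).toNat with hn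
  set m : Nat := ((y_fin - y_ini + h - 1) / h).toNat with hm
  have hnpos : 0 < n := ceil_count_pos hw0 (by omega)
  have hmpos : 0 < m := ceil_count_pos hh0 (by omega)
  have hnC : PySem.Int.floordiv (x_fin - x_ini + w - 1) w = (n : Int) := by
    rw [PySem.Int.floordiv_eq_ediv_of_pos hw0, hn,
      Int.toNat_of_nonneg (Int.ediv_nonneg (by omega) (by omega))]
  have hmC : PySem.Int.floordiv (y_fin - y_ini + h - 1) h = (m : Int) := by
    rw [PySem.Int.floordiv_eq_ediv_of_pos hh0, hm,
      Int.toNat_of_nonneg (Int.ediv_nonneg (by omega) (by omega))]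
  -- A side: nested folds become flatMap of maps over List.range
  simp only [PySem.List.foldl_append_singleton_eq_map, PySem.List.foldl_append_eq_flatMap,
    List.nil_append]
  rw [PySem.List.pyRange_of_pos y_ini y_fin hh0, PySem.List.pyRange_of_pos x_ini x_fin hw0,
    if_pos hylt, if_pos hxlt, ← hn, ← hm]
  -- B side: flat range of m*n indices
  rw [hnC, hmC, PySem.List.pyRange_one]
  have hmn : (((m:Int) * (n:Int)) - 0).toNat = m * n := by omega
  rw [hmn, List.map_map,
    range_mul_flat (pvCelda x_ini x_fin y_ini y_fin w h (n:Int) ∘ fun k => (0:Int) + (k:Nat)) m n,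
    List.flatMap_map]
  refine List.flatMap_congr ?_
  intro j hj
  rw [List.map_map]
  refine List.map_congr_left ?_
  intro i hi
  simp only [Function.comp, zero_add]
  rw [celda_decode x_ini x_fin y_ini y_fin w h n hnpos j i (List.mem_range.mp hi)]
  have hx : x_ini + w * (i:Int) = x_ini + (i:Int) * w := by ring
  have hy : y_ini + h * (j:Int) = y_ini + (j:Int) * h := by ring
  simp only [min_def]
  split_ifs <;> simp <;> omega
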